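-- pv_equiv track=rewrite | github.com/pypi-data/pypi-mirror-357 | packages/ipfs-kit-py/ipfs_kit_py-0.3.0-py3-none-any.whl/ipfs_kit_py/libp2p/enhanced_dht_discovery.py | _calculate_bucket_index
-- ===== SOURCE A (Python) =====
-- def _calculate_bucket_index(id1, id2):
--     """Calculate the k-bucket index for two peer IDs using XOR distance."""
--     # Get the XOR distance
--     xor_distance = bytes(a ^ b for a, b in zip(id1, id2))
--
--     # Find the most significant bit that differs
--     for i, byte in enumerate(xor_distance):
--         if byte != 0:
--             # Found a non-zero byte, calculate the bit position
--             bit_pos = 7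
--             while bit_pos >= 0:
--                 if (byte >> bit_pos) & 1:
--                     return i * 8 + (7 - bit_pos)
--                 bit_pos -= 1
--
--     # IDs are identical, use last bucket
--     return 255
-- ===== SOURCE B (Python) =====
-- def _calculate_bucket_index(id1, id2):
--     """Calculate the k-bucket index for two peer IDs using XOR distance."""
--     xor_distance = bytes(a ^ b for a, b in zip(id1, id2))
--     n = int.from_bytes(xor_distance, 'big')
--     if n == 0:
--         return 255
--     return len(xor_distance) * 8 - n.bit_length()
-- ===== Notes on version B (the rewrite author's own statement) =====
-- stated objective: simpler
-- what changed: Replaces the byte scan with an inner bit loop by one big-endian integer conversion and a closed-form bit_length computation of the leading-zero count.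
import Mathlib
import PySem

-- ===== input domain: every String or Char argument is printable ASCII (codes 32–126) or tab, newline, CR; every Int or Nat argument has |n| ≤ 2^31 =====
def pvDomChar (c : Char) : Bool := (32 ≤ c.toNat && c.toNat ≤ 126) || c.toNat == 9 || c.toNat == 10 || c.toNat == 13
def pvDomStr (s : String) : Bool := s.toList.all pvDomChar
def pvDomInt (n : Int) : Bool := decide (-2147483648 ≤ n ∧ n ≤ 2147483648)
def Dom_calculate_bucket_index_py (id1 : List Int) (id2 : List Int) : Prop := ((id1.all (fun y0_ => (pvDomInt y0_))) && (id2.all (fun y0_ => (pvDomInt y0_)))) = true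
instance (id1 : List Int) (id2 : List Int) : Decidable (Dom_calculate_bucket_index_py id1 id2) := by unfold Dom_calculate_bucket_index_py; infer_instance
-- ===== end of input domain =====

-- B replaces A's byte scan with its inner bit loop by one big-endian integer
-- conversion and a closed-form bit_length computation; objective: simpler.

-- ===== PORT A =====
-- inner `while bit_pos >= 0` loop: fuel = bit_pos + 1, so pvInnerA b 8 starts at bit_pos = 7;
-- none = the while loop exited without returning (then the for loop continues).
def pvInnerA (byte : Int) : Nat → Option Int
  | 0 => none
  | fuel + 1 =>
    if PySem.Int.band (byte >>> fuel) 1 ≠ 0 then some (7 - (fuel : Int))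
    else pvInnerA byte fuel

-- `for i, byte in enumerate(xor_distance)` with the early returns
def pvLoopA : List Int → Int → Int
  | [], _ => 255
  | b :: t, i =>
    if b ≠ 0 then
      match pvInnerA b 8 with
      | some r => i * 8 + r
      | none => pvLoopA t (i + 1)
    else pvLoopA t (i + 1)

def calculate_bucket_index_py (id1 : List Int) (id2 : List Int) : Int :=
  let xorl := (id1.zip id2).map (fun p => PySem.Int.bxor p.1 p.2)
  pvLoopA xorl 0

-- ===== PORT B =====
-- int.from_bytes(xor_distance, 'big')
def pvFromBytes (xs : List Int) : Int := xs.foldl (fun acc b => acc * 256 + b) 0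

def calculate_bucket_index_py_alt (id1 : List Int) (id2 : List Int) : Int :=
  let xorl := (id1.zip id2).map (fun p => PySem.Int.bxor p.1 p.2)
  let n := pvFromBytes xorl
  if n = 0 then 255
  else (xorl.length : Int) * 8 - (PySem.Int.bitLength n : Int)

-- ===== PRECONDITION & SPEC =====
-- Pre_ holds exactly when every zipped XOR lands in a byte (0..255); otherwise
-- Python's bytes() constructor raises ValueError and A returns nothing.
def Pre_calculate_bucket_index_py (id1 : List Int) (id2 : List Int) : Prop :=
  ∀ p ∈ id1.zip id2, 0 ≤ PySem.Int.bxor p.1 p.2 ∧ PySem.Int.bxor p.1 p.2 < 256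

instance (id1 : List Int) (id2 : List Int) : Decidable (Pre_calculate_bucket_index_py id1 id2) := by
  unfold Pre_calculate_bucket_index_py; infer_instance

def pvWitness_calculate_bucket_index_py : List Int × List Int := ([1, 2, 3], [1, 2, 7])

def Spec_calculate_bucket_index_py (id1 : List Int) (id2 : List Int) (out : Int) : Prop := out = calculate_bucket_index_py_alt id1 id2
instance (id1 : List Int) (id2 : List Int) (out : Int) : Decidable (Spec_calculate_bucket_index_py id1 id2 out) := by unfold Spec_calculate_bucket_index_py; infer_instance

-- ===== CLAIM (what is proved, stated in full; the proofs are below) =====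
def Claim_equal_calculate_bucket_index_py : Prop := ∀ (id1 : List Int) (id2 : List Int), Dom_calculate_bucket_index_py id1 id2 → Pre_calculate_bucket_index_py id1 id2 → Spec_calculate_bucket_index_py id1 id2 (calculate_bucket_index_py id1 id2)

-- ===== LEMMAS AND PROOFS =====

-- the inner while loop on a nonzero byte finds the highest set bit: 7 - log2
set_option maxRecDepth 8192 in
lemma pvInnerA_byte : ∀ m : Nat, m < 256 → 0 < m →
    pvInnerA (m : Int) 8 = some (7 - (Nat.log2 m : Int)) ∧ Nat.log2 m ≤ 7 := by
  decide

lemma pvFromBytes_shift : ∀ (t : List Int) (a : Int),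
    t.foldl (fun acc b => acc * 256 + b) a = a * 256 ^ t.length + pvFromBytes t := by
  intro t
  induction t with
  | nil => intro a; simp [pvFromBytes]
  | cons b t ih =>
    intro a
    show List.foldl _ (a * 256 + b) t = a * 256 ^ (b :: t).length + pvFromBytes (b :: t)
    rw [ih (a * 256 + b),
        show pvFromBytes (b :: t) = List.foldl (fun acc b => acc * 256 + b) (0 * 256 + b) t from rfl,
        ih (0 * 256 + b), List.length_cons]
    ring

lemma pvFromBytes_cons (b : Int) (t : List Int) :
    pvFromBytes (b :: t) = b * 256 ^ t.length + pvFromBytes t := by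
  show List.foldl _ (0 * 256 + b) t = _
  rw [pvFromBytes_shift t (0 * 256 + b)]
  ring

lemma pvFromBytes_bounds : ∀ t : List Int, (∀ b ∈ t, 0 ≤ b ∧ b < 256) →
    0 ≤ pvFromBytes t ∧ pvFromBytes t < 256 ^ t.length := by
  intro t
  induction t with
  | nil => intro _; simp [pvFromBytes]
  | cons b t ih =>
    intro h
    have hb := h b (by simp)
    have ht := ih (fun x hx => h x (by simp [hx]))
    have hp : (0 : Int) < 256 ^ t.length := by positivity
    rw [pvFromBytes_cons, List.length_cons]
    constructor
    · nlinarith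
    · rw [pow_succ]; nlinarith

lemma log2_scaled (B k R : Nat) (h1 : 1 ≤ B) (h2 : B < 256) (h3 : R < 256 ^ k) :
    Nat.log2 (B * 256 ^ k + R) = Nat.log2 B + 8 * k := by
  have h256 : (256 : Nat) ^ k = 2 ^ (8 * k) := by
    rw [show (256 : Nat) = 2 ^ 8 from rfl, ← pow_mul]
  have hlow : 2 ^ Nat.log2 B ≤ B := by
    rw [Nat.log2_eq_log_two]
    exact Nat.pow_log_le_self 2 (by omega)
  have hhigh : B < 2 ^ (Nat.log2 B + 1) := by
    rw [Nat.log2_eq_log_two]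
    exact Nat.lt_pow_succ_log_self (by norm_num) B
  rw [Nat.log2_eq_log_two]
  apply Nat.log_eq_of_pow_le_of_lt_pow
  · calc 2 ^ (Nat.log2 B + 8 * k) = 2 ^ Nat.log2 B * 2 ^ (8 * k) := by rw [pow_add]
    _ ≤ B * 256 ^ k := by rw [h256]; exact Nat.mul_le_mul_right _ hlow
    _ ≤ B * 256 ^ k + R := Nat.le_add_right _ _
  · calc B * 256 ^ k + R < B * 256 ^ k + 256 ^ k := by omega
    _ = (B + 1) * 256 ^ k := by ring
    _ ≤ 2 ^ (Nat.log2 B + 1) * 2 ^ (8 * k) := by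
        rw [h256]; exact Nat.mul_le_mul_right _ (by omega)
    _ = 2 ^ (Nat.log2 B + 8 * k + 1) := by rw [← pow_add]; ring_nf

-- bit_length of a positive integer, through Nat.log2
lemma bitLength_pos_eq (n : Int) (hn : 0 < n) :
    PySem.Int.bitLength n = Nat.log2 n.toNat + 1 := by
  have hne : n ≠ 0 := hn.ne'
  have hlow := PySem.Int.two_pow_bitLength_le n hne
  have hhigh := PySem.Int.lt_two_pow_bitLength n
  have habs : n.natAbs = n.toNat := by omega
  rw [habs] at hlow hhigh
  have hbl : 1 ≤ PySem.Int.bitLength n := by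
    by_contra hc
    have : PySem.Int.bitLength n = 0 := by omega
    rw [this] at hhigh
    omega
  have : Nat.log2 n.toNat = PySem.Int.bitLength n - 1 := by
    rw [Nat.log2_eq_log_two]
    apply Nat.log_eq_of_pow_le_of_lt_pow hlow
    rw [show PySem.Int.bitLength n - 1 + 1 = PySem.Int.bitLength n by omega]
    exact hhigh
  omega

lemma pvLoopA_closed : ∀ L : List Int, (∀ b ∈ L, 0 ≤ b ∧ b < 256) → ∀ i : Int,
    pvLoopA L i =
      if pvFromBytes L = 0 then 255
      else i * 8 + ((L.length : Int) * 8 - ((Nat.log2 (pvFromBytes L).toNat : Int) + 1)) := by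
  intro L
  induction L with
  | nil => intro _ i; simp [pvLoopA, pvFromBytes]
  | cons b t ih =>
    intro h i
    have hb := h b (by simp)
    have ht : ∀ x ∈ t, 0 ≤ x ∧ x < 256 := fun x hx => h x (by simp [hx])
    have hbt := pvFromBytes_bounds t ht
    have hp : (0 : Int) < 256 ^ t.length := by positivity
    have hs := pvFromBytes_cons b t
    by_cases hb0 : b = 0
    · subst hb0
      have hval : pvFromBytes ((0 : Int) :: t) = pvFromBytes t := by rw [hs]; ring
      rw [show pvLoopA (0 :: t) i = pvLoopA t (i + 1) by simp [pvLoopA]]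
      rw [ih ht (i + 1), hval]
      split_ifs with h0
      · rfl
      · simp only [List.length_cons]; push_cast; ring
    · -- first nonzero byte
      have hm : b = ((b.toNat : Nat) : Int) := (Int.toNat_of_nonneg hb.1).symm
      have hmlt : b.toNat < 256 := by omega
      have hmpos : 0 < b.toNat := by omega
      obtain ⟨hinner, hlog7⟩ := pvInnerA_byte b.toNat hmlt hmpos
      have hloop : pvLoopA (b :: t) i = i * 8 + (7 - (Nat.log2 b.toNat : Int)) := by
        rw [show pvLoopA (b :: t) i =
            (if b ≠ 0 then
              match pvInnerA b 8 with
              | some r => i * 8 + r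
              | none => pvLoopA t (i + 1)
            else pvLoopA t (i + 1)) from rfl]
        rw [if_pos hb0, hm, hinner]
        rw [Int.toNat_natCast]
      have hpos : 0 < pvFromBytes (b :: t) := by
        rw [hs]; nlinarith [hbt.1, (show 1 ≤ b by omega)]
      have hcast : pvFromBytes (b :: t)
          = ((b.toNat * 256 ^ t.length + (pvFromBytes t).toNat : Nat) : Int) := by
        rw [hs]
        push_cast
        rw [Int.toNat_of_nonneg hb.1, Int.toNat_of_nonneg hbt.1]
      have hRlt : (pvFromBytes t).toNat < 256 ^ t.length := by
        have h1 : ((pvFromBytes t).toNat : Int) < ((256 ^ t.length : Nat) : Int) := by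
          rw [Int.toNat_of_nonneg hbt.1]; push_cast; exact hbt.2
        exact_mod_cast h1
      have hlogn : Nat.log2 ((pvFromBytes (b :: t)).toNat)
          = Nat.log2 b.toNat + 8 * t.length := by
        rw [hcast, Int.toNat_natCast]
        exact log2_scaled _ _ _ hmpos hmlt hRlt
      rw [hloop, if_neg hpos.ne', hlogn]
      simp only [List.length_cons]
      push_cast
      ring

-- ===== VERDICT (by name: the statement is the Claim_ definition above) =====
theorem calculate_bucket_index_py_spec : Claim_equal_calculate_bucket_index_py := by
  intro id1 id2 _ hpre
  unfold Spec_calculate_bucket_index_py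
  have hbnds : ∀ b ∈ (id1.zip id2).map (fun p => PySem.Int.bxor p.1 p.2), 0 ≤ b ∧ b < 256 := by
    intro b hbmem
    obtain ⟨p, hp, rfl⟩ := List.mem_map.mp hbmem
    exact hpre p hp
  have ha : calculate_bucket_index_py id1 id2
      = pvLoopA ((id1.zip id2).map (fun p => PySem.Int.bxor p.1 p.2)) 0 := rfl
  have halt : calculate_bucket_index_py_alt id1 id2
      = (if pvFromBytes ((id1.zip id2).map (fun p => PySem.Int.bxor p.1 p.2)) = 0 then (255 : Int)
         else (((id1.zip id2).map (fun p => PySem.Int.bxor p.1 p.2)).length : Int) * 8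
              - (PySem.Int.bitLength (pvFromBytes ((id1.zip id2).map (fun p => PySem.Int.bxor p.1 p.2))) : Int)) := rfl
  rw [ha, halt, pvLoopA_closed _ hbnds 0]
  split_ifs with h0
  · rfl
  · have hn : 0 < pvFromBytes ((id1.zip id2).map (fun p => PySem.Int.bxor p.1 p.2)) :=
      lt_of_le_of_ne (pvFromBytes_bounds _ hbnds).1 (Ne.symm h0)
    rw [bitLength_pos_eq _ hn]
    push_cast
    ring
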